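-- pv_equiv track=rewrite | github.com/ErosSph/CARTCOV | proof_core_cegar.py | _resolve_signal_alias
-- ===== SOURCE A (Python) =====
-- def _resolve_signal_alias(name, signal_map, cache):
--     if name in cache:
--         return cache[name]
--     if name in signal_map:
--         cache[name] = name
--         return name
--     candidates = [key for key in signal_map if key.endswith("." + name)]
--     if len(candidates) == 1:
--         cache[name] = candidates[0]
--         return candidates[0]
--     if candidates:
--         min_depth = min(key.count(".") for key in candidates)
--         best = [key for key in candidates if key.count(".") == min_depth]
--         if len(best) == 1:
--             cache[name] = best[0]
--             return best[0]
--     cache[name] = None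
--     return None
-- ===== SOURCE B (Python) =====
-- def _resolve_signal_alias(name, signal_map, cache):
--     if name in cache:
--         return cache[name]
--     if name in signal_map:
--         cache[name] = name
--         return name
--     suffix = "." + name
--     min_depth = None
--     best = None
--     count = 0
--     for key in signal_map:
--         if key.endswith(suffix):
--             d = key.count(".")
--             if min_depth is None or d < min_depth:
--                 min_depth, best, count = d, key, 1
--             elif d == min_depth:
--                 count += 1
--     result = best if count == 1 else None
--     cache[name] = result
--     return result
-- ===== Notes on version B (the rewrite author's own statement) =====
-- stated objective: faster
-- what changed: Replaces the three passes over the map (candidate comprehension, min over dot-counts, filter at the minimum) and the redundant single-candidate special case with one loop that maintains the minimum depth, the first key at it, and the count at it.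
import Mathlib
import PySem

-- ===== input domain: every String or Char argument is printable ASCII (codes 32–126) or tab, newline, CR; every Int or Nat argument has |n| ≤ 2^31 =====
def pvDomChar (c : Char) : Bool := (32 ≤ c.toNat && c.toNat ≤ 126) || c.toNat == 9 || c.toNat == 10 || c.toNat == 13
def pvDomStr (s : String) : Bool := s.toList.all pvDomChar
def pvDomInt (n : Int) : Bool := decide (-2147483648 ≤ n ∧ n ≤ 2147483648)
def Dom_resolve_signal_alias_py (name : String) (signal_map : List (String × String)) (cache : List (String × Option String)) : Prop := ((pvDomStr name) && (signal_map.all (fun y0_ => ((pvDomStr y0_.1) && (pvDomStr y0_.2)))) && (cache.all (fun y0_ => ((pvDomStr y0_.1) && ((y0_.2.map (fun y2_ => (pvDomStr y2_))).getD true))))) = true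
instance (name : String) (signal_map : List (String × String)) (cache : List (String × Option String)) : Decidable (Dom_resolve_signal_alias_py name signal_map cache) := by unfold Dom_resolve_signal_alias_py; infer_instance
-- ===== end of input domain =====

-- B replaces A's three passes over the keys (candidate filter, min of dot-counts, filter at
-- the minimum) by ONE loop keeping (min depth, first key at it, count at it); return values
-- are proved equal — both Pythons also write the same entry into `cache` (mutation not modelled).

-- ===== PORT A =====
-- `for key in signal_map` iterates the dict's (distinct, first-occurrence-ordered) keys:
-- exact as PySem.Set.ofList of the association list's keys.
def resolve_signal_alias_py (name : String) (signal_map : List (String × String)) (cache : List (String × Option String)) : Option String :=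
  match List.lookup name cache with          -- `if name in cache: return cache[name]` (first match)
  | some v => v
  | none =>
    let keys := PySem.Set.ofList (signal_map.map Prod.fst)
    if keys.contains name then some name     -- `if name in signal_map: return name`
    else
      let candidates := keys.filter (fun k => PySem.Str.endswith k ("." ++ name))
      if candidates.length = 1 then
        candidates.head?                     -- `return candidates[0]` (guard makes it some _)
      else if candidates.isEmpty then none   -- fall through: `return None`
      else
        match PySem.List.min? (candidates.map (fun k => PySem.Str.count k ".")) (fun x => x) with
        | none => none                       -- unreachable: candidates nonempty
        | some min_depth =>
          let best := candidates.filter (fun k => PySem.Str.count k "." == min_depth)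
          if best.length = 1 then best.head? -- `return best[0]`
          else none

-- ===== PORT B =====
-- single pass: state = none (no candidate yet) | some (min_depth, best, count_at_min)
def resolve_signal_alias_py_alt (name : String) (signal_map : List (String × String)) (cache : List (String × Option String)) : Option String :=
  match List.lookup name cache with
  | some v => v
  | none =>
    let keys := PySem.Set.ofList (signal_map.map Prod.fst)
    if keys.contains name then some name
    else
      let st := keys.foldl (fun st k =>
        if PySem.Str.endswith k ("." ++ name) then
          let d := PySem.Str.count k "."
          match st with
          | none => some (d, k, 1)
          | some (m, b, c) =>
            if d < m then some (d, k, 1)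
            else if d = m then some (m, b, c + 1)
            else some (m, b, c)
        else st) (none : Option (Nat × String × Nat))
      match st with
      | none => none
      | some (_, b, c) => if c = 1 then some b else none

-- ===== PRECONDITION & SPEC =====
def Spec_resolve_signal_alias_py (name : String) (signal_map : List (String × String)) (cache : List (String × Option String)) (out : Option String) : Prop := out = resolve_signal_alias_py_alt name signal_map cache
instance (name : String) (signal_map : List (String × String)) (cache : List (String × Option String)) (out : Option String) : Decidable (Spec_resolve_signal_alias_py name signal_map cache out) := by unfold Spec_resolve_signal_alias_py; infer_instance

-- ===== CLAIM (what is proved, stated in full; the proofs are below) =====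
def Claim_equal_resolve_signal_alias_py : Prop := ∀ (name : String) (signal_map : List (String × String)) (cache : List (String × Option String)), Dom_resolve_signal_alias_py name signal_map cache → Spec_resolve_signal_alias_py name signal_map cache (resolve_signal_alias_py name signal_map cache)

-- ===== LEMMAS AND PROOFS =====

-- B's loop body, abstracted over the suffix test p and the depth function f
def pvStep (p : String → Bool) (f : String → Nat) (st : Option (Nat × String × Nat)) (k : String) : Option (Nat × String × Nat) :=
  if p k then
    let d := f k
    match st with
    | none => some (d, k, 1)
    | some (m, b, c) =>
      if d < m then some (d, k, 1)
      else if d = m then some (m, b, c + 1)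
      else some (m, b, c)
  else st

-- the invariant tying B's state to A's candidate list
def pvInv (f : String → Nat) (cs : List String) (st : Option (Nat × String × Nat)) : Prop :=
  match st with
  | none => cs = []
  | some (m, b, c) =>
    (∀ k ∈ cs, m ≤ f k) ∧
    (cs.filter (fun k => f k == m)).head? = some b ∧
    c = (cs.filter (fun k => f k == m)).length

lemma pvStep_skip (p : String → Bool) (f : String → Nat) (st : Option (Nat × String × Nat))
    (k : String) (h : p k = false) : pvStep p f st k = st := by
  simp [pvStep, h]

-- the fold only looks at candidates
lemma pvFold_filter (p : String → Bool) (f : String → Nat) (ks : List String)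
    (st : Option (Nat × String × Nat)) :
    ks.foldl (pvStep p f) st = (ks.filter p).foldl (pvStep p f) st := by
  induction ks generalizing st with
  | nil => rfl
  | cons k t ih =>
    by_cases hk : p k = true
    · simp [hk, List.foldl_cons, ih]
    · simp only [Bool.not_eq_true] at hk
      simp [hk, List.foldl_cons, pvStep_skip p f st k hk, ih]

lemma pvInv_step (p : String → Bool) (f : String → Nat) (cs : List String)
    (st : Option (Nat × String × Nat)) (k : String) (hp : p k = true)
    (h : pvInv f cs st) : pvInv f (cs ++ [k]) (pvStep p f st k) := by
  cases st with
  | none =>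
    simp only [pvInv] at h
    subst h
    simp [pvInv, pvStep, hp, List.filter]
  | some t =>
    obtain ⟨m, b, c⟩ := t
    obtain ⟨hle, hhd, hlen⟩ := h
    simp only [pvStep, hp, if_pos]
    by_cases h1 : f k < m
    · -- new strict minimum: old candidates all have depth > f k
      have hfilt : cs.filter (fun x => f x == f k) = [] := by
        rw [List.filter_eq_nil_iff]
        intro x hx
        have := hle x hx
        simp only [beq_iff_eq]
        omega
      rw [if_pos h1]
      simp only [pvInv, List.filter_append, hfilt, List.nil_append]
      refine ⟨?_, ?_, ?_⟩
      · intro x hx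
        rcases List.mem_append.mp hx with hx | hx
        · exact le_of_lt (lt_of_lt_of_le h1 (hle x hx))
        · simp at hx; subst hx; exact le_refl _
      · simp [List.filter]
      · simp [List.filter]
    · by_cases h2 : f k = m
      · -- tie at the minimum: count increases
        rw [if_neg h1, if_pos h2]
        simp only [pvInv, List.filter_append]
        have hfk : [k].filter (fun x => f x == m) = [k] := by
          simp [h2]
        refine ⟨?_, ?_, ?_⟩
        · intro x hx
          rcases List.mem_append.mp hx with hx | hx
          · exact hle x hx
          · simp at hx; subst hx; omega
        · rw [hfk, List.head?_append_of_ne_nil]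
          · exact hhd
          · intro hnil; rw [hnil] at hhd; simp at hhd
        · rw [hfk]; simp [hlen]
      · -- deeper than the minimum: state unchanged
        rw [if_neg h1, if_neg h2]
        simp only [pvInv, List.filter_append]
        have hfk : [k].filter (fun x => f x == m) = [] := by
          simp [h2]
        refine ⟨?_, ?_, ?_⟩
        · intro x hx
          rcases List.mem_append.mp hx with hx | hx
          · exact hle x hx
          · simp at hx; subst hx; omega
        · rw [hfk, List.append_nil]; exact hhd
        · rw [hfk, List.append_nil]; exact hlen

lemma pvInv_fold (p : String → Bool) (f : String → Nat) (cs : List String)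
    (hcs : ∀ k ∈ cs, p k = true) :
    pvInv f cs (cs.foldl (pvStep p f) none) := by
  induction cs using List.reverseRecOn with
  | nil => simp [pvInv]
  | append_singleton t k ih =>
    rw [List.foldl_append, List.foldl_cons, List.foldl_nil]
    exact pvInv_step p f t _ k (hcs k (by simp))
      (ih (fun x hx => hcs x (by simp [hx])))

-- A's min over the candidate depths equals B's running minimum
lemma pvMin_eq (f : String → Nat) (cs : List String) (m : Nat) (b : String) (c : Nat)
    (h : pvInv f cs (some (m, b, c))) :
    PySem.List.min? (cs.map f) (fun x => x) = some m := by
  obtain ⟨hle, hhd, _⟩ := h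
  have hne : (cs.filter (fun k => f k == m)) ≠ [] := by
    intro hnil; rw [hnil] at hhd; simp at hhd
  obtain ⟨x, hx⟩ := List.exists_mem_of_ne_nil _ hne
  have hxm : f x = m := by
    have := List.of_mem_filter hx
    simpa using this
  have hxcs : x ∈ cs := List.mem_of_mem_filter hx
  have hmem : m ∈ cs.map f := by
    exact List.mem_map.mpr ⟨x, hxcs, hxm⟩
  cases hmin : PySem.List.min? (cs.map f) (fun x => x) with
  | none =>
    rw [PySem.List.min?_eq_none_iff] at hmin
    simp [hmin] at hmem
  | some m' =>
    have h1 : m' ∈ cs.map f := PySem.List.min?_mem hmin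
    obtain ⟨y, hy, hym⟩ := List.mem_map.mp h1
    have h2 : m ≤ m' := hym ▸ hle y hy
    have h3 : (fun x => x) m' ≤ (fun x => x) m := PySem.List.min?_isMin hmin m hmem
    simp only at h3
    have : m = m' := le_antisymm h2 h3
    rw [this]

-- the core: A's three-pass result from the candidate list = B's state read-out
lemma pvCore (p : String → Bool) (f : String → Nat) (cs : List String)
    (hcs : ∀ k ∈ cs, p k = true) :
    (if cs.length = 1 then cs.head?
     else if cs.isEmpty then none
     else match PySem.List.min? (cs.map f) (fun x => x) with
       | none => none
       | some m =>
         if (cs.filter (fun k => f k == m)).length = 1 then (cs.filter (fun k => f k == m)).head?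
         else none)
    = (match cs.foldl (pvStep p f) none with
       | none => none
       | some (_, b, c) => if c = 1 then some b else none) := by
  have hinv := pvInv_fold p f cs hcs
  cases hst : cs.foldl (pvStep p f) none with
  | none =>
    rw [hst] at hinv
    simp only [pvInv] at hinv
    subst hinv
    simp
  | some t =>
    obtain ⟨m, b, c⟩ := t
    rw [hst] at hinv
    have hmin := pvMin_eq f cs m b c hinv
    obtain ⟨hle, hhd, hlen⟩ := hinv
    have hcsne : cs ≠ [] := by
      intro hnil
      subst hnil
      simp [List.filter] at hhd
    have hie : cs.isEmpty = false := by simp [hcsne]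
    simp only [hie, Bool.false_eq_true, if_false, hmin]
    by_cases h1 : cs.length = 1
    · -- single candidate: both return it
      obtain ⟨k, hk⟩ := List.length_eq_one_iff.mp h1
      subst hk
      have hkm : (f k == m) = true := by
        by_contra hne
        rw [Bool.not_eq_true] at hne
        rw [show List.filter (fun x => f x == m) [k] = [] from by
          simp [hne]] at hhd
        simp at hhd
      have hfilt : List.filter (fun x => f x == m) [k] = [k] := by
        simp [hkm]
      rw [hfilt] at hhd hlen
      simp only [List.head?_cons, Option.some.injEq] at hhd
      simp only [List.length_cons, List.length_nil] at hlen
      simp [hlen, hhd]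
    · simp only [h1, if_false, ← hlen]
      by_cases hc : c = 1
      · simp [hc, hhd]
      · simp [hc]

-- ===== VERDICT (by name: the statement is the Claim_ definition above) =====
theorem resolve_signal_alias_py_spec : Claim_equal_resolve_signal_alias_py := by
  intro name signal_map cache _
  unfold Spec_resolve_signal_alias_py resolve_signal_alias_py resolve_signal_alias_py_alt
  cases List.lookup name cache with
  | some v => rfl
  | none =>
    simp only
    set keys := PySem.Set.ofList (signal_map.map Prod.fst) with hkeys
    by_cases hc : keys.contains name = true
    · simp only [hc, if_true]
    · simp only [Bool.not_eq_true] at hc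
      simp only [hc, Bool.false_eq_true, if_false]
      have key := pvCore (fun k => PySem.Str.endswith k ("." ++ name))
        (fun k => PySem.Str.count k ".")
        (keys.filter (fun k => PySem.Str.endswith k ("." ++ name)))
        (fun k hk => List.of_mem_filter (p := fun k => PySem.Str.endswith k ("." ++ name)) hk)
      rw [← pvFold_filter] at key
      exact key
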